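-- pv_equiv track=rewrite | github.com/cisert/bcpaff | bcpaff/data_processing/manual_structure_prep.py | split_resname_and_resnum
-- ===== SOURCE A (Python) =====
-- from typing import Dict, List, Set, Tuple, Union
--
-- def split_resname_and_resnum(s: str) -> Tuple[str, int]:
--     """Split residue name and residue number from mol2-files.
--
--     Parameters
--     ----------
--     s : str
--         combined resname and resnum
--
--     Returns
--     -------
--     tuple(str, str)
--         individual resname, resnum
--     """
--     resnum, resname = [], []
--     still_at_resnum = True
--     for x in s[::-1]:
--         if still_at_resnum and x.isnumeric():
--             resnum.append(x)
--         else: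
--             resname.append(x)
--             still_at_resnum = False
--     resnum = int("".join(resnum[::-1])) if len(resnum) else 9999
--     resname = "".join(resname[::-1])
--     return resname, resnum
-- ===== SOURCE B (Python) =====
-- def split_resname_and_resnum(s):
--     """Split residue name and residue number from mol2-files."""
--     i = len(s)
--     while i > 0 and s[i - 1].isnumeric():
--         i -= 1
--     resname, suffix = s[:i], s[i:]
--     return resname, int(suffix) if suffix else 9999
-- ===== Notes on version B (the rewrite author's own statement) =====
-- stated objective: simpler
-- what changed: B finds the split boundary with an index scan from the end and slices the string, instead of reversing the string, accumulating two character lists with a flag, and reversing/joining them back.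
import Mathlib
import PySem

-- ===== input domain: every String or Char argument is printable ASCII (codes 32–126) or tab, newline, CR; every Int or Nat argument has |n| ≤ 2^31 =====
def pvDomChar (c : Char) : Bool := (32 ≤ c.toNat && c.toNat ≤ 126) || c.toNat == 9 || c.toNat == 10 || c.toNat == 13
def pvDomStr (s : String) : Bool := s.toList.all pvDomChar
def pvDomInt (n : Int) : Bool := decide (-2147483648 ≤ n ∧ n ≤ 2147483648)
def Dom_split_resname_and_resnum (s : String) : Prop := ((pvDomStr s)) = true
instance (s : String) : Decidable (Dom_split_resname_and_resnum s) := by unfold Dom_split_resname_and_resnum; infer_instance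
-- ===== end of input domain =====

-- B replaces A's reverse-and-accumulate-two-lists loop by an index scan from the end plus two slices (objective: simpler).
-- Python's str.isnumeric is ported as PySem.Chars.isdigit: exact on the printable-ASCII domain Dom_.

-- ===== PORT A =====
-- the body of A's 'for x in s[::-1]' loop; state = (resnum, resname, still_at_resnum)
def pvStepA (acc : List Char × List Char × Bool) (x : Char) : List Char × List Char × Bool :=
  if acc.2.2 && PySem.Chars.isdigit x then (acc.1 ++ [x], acc.2.1, acc.2.2)
  else (acc.1, acc.2.1 ++ [x], false)

def split_resname_and_resnum (s : String) : String × Int :=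
  let st := s.toList.reverse.foldl pvStepA ([], [], true)
  -- int("".join(resnum[::-1])): the collected chars are ASCII digits and nonempty here, so ofChars? is some; getD 0 is unreachable
  let resnum : Int := if st.1.length ≠ 0 then (PySem.Int.ofChars? st.1.reverse).getD 0 else 9999
  (String.ofList st.2.1.reverse, resnum)

-- ===== PORT B =====
-- 'i = len(s); while i > 0 and s[i-1].isnumeric(): i -= 1' — the run of trailing digits, walked over the reversed char list
def pvTrailDigits : List Char → Nat
  | [] => 0
  | c :: cs => if PySem.Chars.isdigit c then pvTrailDigits cs + 1 else 0

def split_resname_and_resnum_alt (s : String) : String × Int :=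
  let l := s.toList
  let i := l.length - pvTrailDigits l.reverse
  let suffix := l.drop i
  -- int(suffix): suffix is a nonempty ASCII-digit string here, so ofChars? is some; getD 0 is unreachable
  (String.ofList (l.take i), if suffix ≠ [] then (PySem.Int.ofChars? suffix).getD 0 else 9999)

-- ===== PRECONDITION & SPEC =====
def Spec_split_resname_and_resnum (s : String) (out : String × Int) : Prop := out = split_resname_and_resnum_alt s
instance (s : String) (out : String × Int) : Decidable (Spec_split_resname_and_resnum s out) := by unfold Spec_split_resname_and_resnum; infer_instance

-- ===== CLAIM (what is proved, stated in full; the proofs are below) =====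
def Claim_equal_split_resname_and_resnum : Prop := ∀ (s : String), Dom_split_resname_and_resnum s → Spec_split_resname_and_resnum s (split_resname_and_resnum s)

-- ===== LEMMAS AND PROOFS =====

-- once still_at_resnum is false, everything goes to resname
theorem foldA_false (r : List Char) (a1 a2 : List Char) :
    r.foldl pvStepA (a1, a2, false) = (a1, a2 ++ r, false) := by
  induction r generalizing a2 with
  | nil => simp
  | cons c cs ih => simp [pvStepA, ih]

-- A's loop splits the reversed string into its digit prefix and the rest
theorem foldA_true (r : List Char) (a1 a2 : List Char) :
    r.foldl pvStepA (a1, a2, true) =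
      (a1 ++ r.takeWhile PySem.Chars.isdigit, a2 ++ r.dropWhile PySem.Chars.isdigit,
        r.all PySem.Chars.isdigit) := by
  induction r generalizing a1 with
  | nil => simp
  | cons c cs ih =>
    by_cases h : PySem.Chars.isdigit c
    · simp [pvStepA, h, ih, List.dropWhile_cons]
    · simp [pvStepA, h, foldA_false]

-- B's while-loop counter is the length of the digit prefix of the reversed string
theorem pvTrailDigits_eq (r : List Char) :
    pvTrailDigits r = (r.takeWhile PySem.Chars.isdigit).length := by
  induction r with
  | nil => rfl
  | cons c cs ih =>
    by_cases h : PySem.Chars.isdigit c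
    · simp [pvTrailDigits, h, ih]
    · simp [pvTrailDigits, h]

theorem ports_agree (s : String) :
    split_resname_and_resnum s = split_resname_and_resnum_alt s := by
  unfold split_resname_and_resnum split_resname_and_resnum_alt
  dsimp only
  rw [foldA_true, pvTrailDigits_eq]
  simp only [List.nil_append]
  have hl : s.toList =
      (s.toList.reverse.dropWhile PySem.Chars.isdigit).reverse ++
      (s.toList.reverse.takeWhile PySem.Chars.isdigit).reverse := by
    rw [← List.reverse_append, List.takeWhile_append_dropWhile, List.reverse_reverse]
  set t := s.toList.reverse.takeWhile PySem.Chars.isdigit with ht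
  set d := s.toList.reverse.dropWhile PySem.Chars.isdigit with hd
  have hi : s.toList.length - t.length = d.length := by
    rw [hl]; simp
  rw [hi, hl, List.take_left' (by simp), List.drop_left' (by simp)]
  by_cases h : t = [] <;> simp [h]

-- ===== VERDICT (by name: the statement is the Claim_ definition above) =====
theorem split_resname_and_resnum_spec : Claim_equal_split_resname_and_resnum := by
  intro s _
  unfold Spec_split_resname_and_resnum
  exact ports_agree s
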